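-- pv_equiv track=rewrite | github.com/pypi-data/pypi-mirror-390 | packages/blue-platform/blue_platform-1.0-py3-none-any.whl/blue/agents/nl2q.py | _parse_data_scope
-- ===== SOURCE A (Python) =====
-- def _parse_data_scope(scope):
--     """Parse a data scope string into its components.
--
--     Parameters:
--         scope: The data scope string to parse.
--
--     Returns:
--         A tuple containing the parsed components (source, database, collection, entity, relation).
--     """
--     source = None
--     database = None
--     collection = None
--     entity = None
--     relation = None
--
--     if scope:
--         parts = scope.strip("/").split("/")
--
--         it = iter(parts)
--
--         for key in it:
--             val = next(it, None)  # default to None if no more items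
--             if key == "source":
--                 source = val or None
--             elif key == "database":
--                 database = val or None
--             elif key == "collection":
--                 collection = val or None
--             elif key == "entity":
--                 entity = val or None
--             elif key == "relation":
--                 relation = val or None
--
--     return source, database, collection, entity, relation
-- ===== SOURCE B (Python) =====
-- def _parse_data_scope(scope):
--     """Parse a data scope string into its components (source, database,
--     collection, entity, relation).
--
--     Instead of one forward pass threading five variables, extract each field
--     independently: walk the key positions (even indices) of the split path
--     BACKWARDS and return at the first hit -- the last assignment wins, so this
--     is the same value A's forward loop ends with."""
--     if not scope:
--         return None, None, None, None, None
--     parts = scope.strip("/").split("/")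
--
--     def last_value(key):
--         for i in reversed(range(0, len(parts), 2)):
--             if parts[i] == key:
--                 if i + 1 < len(parts):
--                     return parts[i + 1] or None
--                 return None  # trailing key without a value
--         return None
--
--     return (last_value("source"), last_value("database"),
--             last_value("collection"), last_value("entity"),
--             last_value("relation"))
-- ===== Notes on version B (the rewrite author's own statement) =====
-- stated objective: alternative
-- what changed: A makes one forward pass over the split path, threading five result variables through an if/elif chain; B extracts each of the five fields independently by scanning the key positions (even indices) backwards and returning at the first hit (last-wins), with no shared loop state.
import Mathlib
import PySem

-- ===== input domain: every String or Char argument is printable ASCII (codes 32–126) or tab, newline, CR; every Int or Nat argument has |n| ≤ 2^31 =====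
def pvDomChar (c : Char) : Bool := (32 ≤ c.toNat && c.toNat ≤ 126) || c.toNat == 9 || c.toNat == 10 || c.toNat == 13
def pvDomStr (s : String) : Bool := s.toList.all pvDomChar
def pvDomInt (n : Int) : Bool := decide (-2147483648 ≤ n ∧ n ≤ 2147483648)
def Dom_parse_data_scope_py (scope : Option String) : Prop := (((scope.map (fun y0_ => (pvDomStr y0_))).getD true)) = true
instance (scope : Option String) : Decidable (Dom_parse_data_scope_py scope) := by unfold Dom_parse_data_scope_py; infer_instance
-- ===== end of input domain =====

-- B replaces A's forward pass that threads five variables through an if/elif chain by five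
-- independent backward scans of the key (even) positions, returning at the first hit
-- (last assignment wins) — objective: alternative decomposition, same cost.

-- ===== PORT A =====

-- `val or None` on an Optional[str]: None and "" both become None
def pvOrNone (v : Option String) : Option String :=
  match v with
  | none => none
  | some s => if s = "" then none else some s

-- the body of A's for-loop: one (key, val) step of the if/elif chain
def pvStepA (st : Option String × Option String × Option String × Option String × Option String)
    (key : String) (val : Option String) :
    Option String × Option String × Option String × Option String × Option String :=
  match st with
  | (s, d, c, e, r) =>
    if key = "source" then (pvOrNone val, d, c, e, r)
    else if key = "database" then (s, pvOrNone val, c, e, r)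
    else if key = "collection" then (s, d, pvOrNone val, e, r)
    else if key = "entity" then (s, d, c, pvOrNone val, r)
    else if key = "relation" then (s, d, c, e, pvOrNone val)
    else (s, d, c, e, r)

-- A's `for key in it: val = next(it, None)` loop: consumes two items per step, None pads the tail
def pvLoopA : List String →
    (Option String × Option String × Option String × Option String × Option String) →
    (Option String × Option String × Option String × Option String × Option String)
  | [], st => st
  | [k], st => pvStepA st k none
  | k :: v :: rest, st => pvLoopA rest (pvStepA st k (some v))

def parse_data_scope_py (scope : Option String) :
    Option String × Option String × Option String × Option String × Option String :=
  match scope with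
  | none => (none, none, none, none, none)
  | some s =>
    if s = "" then (none, none, none, none, none)  -- `if scope:` falsy for ""
    else
      let parts := (PySem.Str.split? (PySem.Str.stripChars s "/") "/").getD []
      pvLoopA parts (none, none, none, none, none)

-- ===== PORT B =====

-- B's `for i in reversed(range(0, len(parts), 2)): …` loop body with early return:
-- scans the given index list, `some r` models `return r`, `none` = loop fell through
def pvScanB (parts : List String) (key : String) : List Int → Option (Option String)
  | [] => none
  | i :: rest =>
    if PySem.List.pyGet? parts i = some key then
      some (if i + 1 < (parts.length : Int)
            then pvOrNone (PySem.List.pyGet? parts (i + 1))  -- parts[i+1] or None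
            else none)                                       -- trailing key without a value
    else pvScanB parts key rest

def parse_data_scope_py_alt (scope : Option String) :
    Option String × Option String × Option String × Option String × Option String :=
  match scope with
  | none => (none, none, none, none, none)
  | some s =>
    if s = "" then (none, none, none, none, none)  -- `if not scope:` for ""
    else
      let parts := (PySem.Str.split? (PySem.Str.stripChars s "/") "/").getD []
      let lastValue := fun k =>
        (pvScanB parts k ((PySem.List.pyRange 0 (parts.length : Int) 2).reverse)).getD none
      (lastValue "source", lastValue "database", lastValue "collection",
       lastValue "entity", lastValue "relation")

-- ===== PRECONDITION & SPEC =====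
def Spec_parse_data_scope_py (scope : Option String) (out : Option String × Option String × Option String × Option String × Option String) : Prop := out = parse_data_scope_py_alt scope
instance (scope : Option String) (out : Option String × Option String × Option String × Option String × Option String) : Decidable (Spec_parse_data_scope_py scope out) := by unfold Spec_parse_data_scope_py; infer_instance

-- ===== CLAIM (what is proved, stated in full; the proofs are below) =====
def Claim_equal_parse_data_scope_py : Prop := ∀ (scope : Option String), Dom_parse_data_scope_py scope → Spec_parse_data_scope_py scope (parse_data_scope_py scope)

-- ===== LEMMAS AND PROOFS =====

-- the value the LAST pair with key k assigns, if any
def pvLastVal : List (String × Option String) → String → Option (Option String)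
  | [], _ => none
  | (a, b) :: r, k =>
    match pvLastVal r k with
    | some v => some v
    | none => if a = k then some b else none

-- A's parts paired two-at-a-time, the odd tail padded with none
def pvPairList : List String → List (String × Option String)
  | [] => []
  | [k] => [(k, none)]
  | k :: v :: rest => (k, some v) :: pvPairList rest

def pvUpdF (L : List (String × Option String)) (k : String) (x : Option String) : Option String :=
  ((pvLastVal L k).map pvOrNone).getD x

lemma pvUpdF_cons (a : String) (b : Option String) (L : List (String × Option String))
    (k : String) (x : Option String) :
    pvUpdF ((a, b) :: L) k x = pvUpdF L k (if a = k then pvOrNone b else x) := by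
  unfold pvUpdF
  simp only [pvLastVal]
  cases pvLastVal L k with
  | some v => simp
  | none => by_cases h : a = k <;> simp [h]

lemma pvStepA_eq (s d c e r : Option String) (k : String) (v : Option String) :
    pvStepA (s, d, c, e, r) k v =
      (if k = "source" then pvOrNone v else s,
       if k = "database" then pvOrNone v else d,
       if k = "collection" then pvOrNone v else c,
       if k = "entity" then pvOrNone v else e,
       if k = "relation" then pvOrNone v else r) := by
  unfold pvStepA
  split_ifs <;> simp_all

lemma pvLoopA_eq (parts : List String) :
    ∀ s d c e r : Option String,
      pvLoopA parts (s, d, c, e, r) =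
        (pvUpdF (pvPairList parts) "source" s,
         pvUpdF (pvPairList parts) "database" d,
         pvUpdF (pvPairList parts) "collection" c,
         pvUpdF (pvPairList parts) "entity" e,
         pvUpdF (pvPairList parts) "relation" r) := by
  induction parts using pvPairList.induct with
  | case1 => intro s d c e r; simp [pvLoopA, pvPairList, pvUpdF, pvLastVal]
  | case2 k =>
    intro s d c e r
    simp only [pvLoopA, pvPairList, pvStepA_eq]
    simp only [pvUpdF, pvLastVal]
    split_ifs <;> simp_all [pvOrNone]
  | case3 k v rest ih =>
    intro s d c e r
    simp only [pvLoopA, pvPairList, pvStepA_eq, ih, pvUpdF_cons]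

-- range(0, n+2, 2) = 0 :: [i+2 for i in range(0, n, 2)]
lemma pvRange2_cons (n : Nat) :
    PySem.List.pyRange 0 ((n : Int) + 2) 2 =
      0 :: (PySem.List.pyRange 0 (n : Int) 2).map (· + 2) := by
  rw [PySem.List.pyRange_of_pos _ _ (by norm_num), PySem.List.pyRange_of_pos _ _ (by norm_num)]
  have h1 : (0 : Int) < (n : Int) + 2 := by positivity
  rw [if_pos h1]
  have hcnt : (((n : Int) + 2 - 0 + 2 - 1) / 2).toNat
      = (if (0 : Int) < (n : Int) then (((n : Int) - 0 + 2 - 1) / 2).toNat else 0) + 1 := by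
    by_cases hn : (0 : Int) < (n : Int)
    · rw [if_pos hn]; omega
    · rw [if_neg hn]; omega
  rw [hcnt, List.range_succ_eq_map]
  simp only [List.map_cons, List.map_map]
  refine List.cons_eq_cons.mpr ⟨by norm_num, ?_⟩
  apply List.map_congr_left
  intro k _
  simp only [Function.comp_apply, Nat.succ_eq_add_one]
  push_cast
  ring

lemma pvScanB_append (parts : List String) (key : String) (a b : List Int) :
    pvScanB parts key (a ++ b) = (pvScanB parts key a).or (pvScanB parts key b) := by
  induction a with
  | nil => simp [pvScanB]
  | cons i t ih =>
    simp only [List.cons_append, pvScanB]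
    split_ifs <;> simp [ih]

-- shifting all indices by 2 skips the first pair
lemma pvGet_shift2 {x y : String} {xs : List String} {i : Int} (hi : 0 ≤ i) :
    PySem.List.pyGet? (x :: y :: xs) (i + 2) = PySem.List.pyGet? xs i := by
  simp only [PySem.List.pyGet?, PySem.List.pyIdx?, List.length_cons]
  rw [if_pos (by omega : (0 : Int) ≤ i + 2), if_pos hi]
  by_cases hb : i < (xs.length : Int)
  · rw [if_pos (by push_cast; omega), if_pos hb]
    have h2 : (i + 2).toNat = i.toNat + 2 := by omega
    simp [h2]
  · rw [if_neg (by push_cast; omega), if_neg hb]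
    rfl

lemma pvScanB_shift (k v : String) (rest : List String) (key : String) (idxs : List Int)
    (h : ∀ i ∈ idxs, 0 ≤ i) :
    pvScanB (k :: v :: rest) key (idxs.map (· + 2)) = pvScanB rest key idxs := by
  induction idxs with
  | nil => rfl
  | cons i t ih =>
    have hi : 0 ≤ i := h i (List.mem_cons_self)
    simp only [List.map_cons, pvScanB]
    rw [pvGet_shift2 hi, show i + 2 + 1 = (i + 1) + 2 by ring, pvGet_shift2 (by omega)]
    by_cases hk : PySem.List.pyGet? rest i = some key
    · rw [if_pos hk, if_pos hk]
      congr 1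
      by_cases h3 : i + 1 < (rest.length : Int)
      · rw [if_pos (by simp only [List.length_cons]; push_cast; omega), if_pos h3]
      · rw [if_neg (by simp only [List.length_cons]; push_cast; omega), if_neg h3]
    · rw [if_neg hk, if_neg hk]
      exact ih (fun j hj => h j (List.mem_cons_of_mem _ hj))

lemma pvRange2_nonneg (n : Int) : ∀ i ∈ PySem.List.pyRange 0 n 2, 0 ≤ i := by
  intro i hi
  rw [PySem.List.pyRange_of_pos _ _ (by norm_num)] at hi
  simp only [List.mem_map] at hi
  obtain ⟨k, _, hk⟩ := hi
  omega

lemma pvGet0 (k : String) (t : List String) :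
    PySem.List.pyGet? (k :: t) 0 = some k := by
  simp [PySem.List.pyGet?, PySem.List.pyIdx?]

-- B's backward scan of the key positions computes the last-wins value of A's pair list
lemma pvScanB_eq_lastVal (parts : List String) (key : String) :
    pvScanB parts key ((PySem.List.pyRange 0 (parts.length : Int) 2).reverse) =
      (pvLastVal (pvPairList parts) key).map pvOrNone := by
  induction parts using pvPairList.induct with
  | case1 =>
    rw [show ((([] : List String).length : Int)) = 0 by simp, PySem.List.pyRange_of_pos _ _ (by norm_num)]
    simp [pvScanB, pvPairList, pvLastVal]
  | case2 k =>
    have : PySem.List.pyRange 0 (([k] : List String).length : Int) 2 = [0] := by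
      rw [PySem.List.pyRange_of_pos _ _ (by norm_num)]
      norm_num
    rw [this]
    simp only [List.reverse_singleton, pvScanB, pvGet0]
    simp only [pvPairList, pvLastVal]
    by_cases hk : k = key
    · rw [if_pos (by simp [hk]), if_pos hk, if_neg (by norm_num)]
      simp [pvOrNone]
    · rw [if_neg (by simp [hk]), if_neg hk]
      rfl
  | case3 k v rest ih =>
    have hlen : (((k :: v :: rest).length : Nat) : Int) = ((rest.length : Nat) : Int) + 2 := by
      simp only [List.length_cons]; push_cast; ring
    rw [hlen, pvRange2_cons rest.length]
    rw [List.reverse_cons, List.map_reverse.symm]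
    rw [pvScanB_append]
    rw [pvScanB_shift k v rest key _ (fun i hi => pvRange2_nonneg _ i (List.mem_reverse.mp hi))]
    simp only [pvPairList, pvLastVal, ih]
    cases hlv : pvLastVal (pvPairList rest) key with
    | some w => simp [Option.or]
    | none =>
      simp only [Option.map_none, Option.none_or]
      simp only [pvScanB, pvGet0]
      by_cases hk : k = key
      · rw [if_pos (by simp [hk]), if_pos hk]
        rw [if_pos (by push_cast; omega)]
        simp
      · rw [if_neg (by simp [hk]), if_neg hk]
        rfl

-- ===== VERDICT (by name: the statement is the Claim_ definition above) =====
theorem parse_data_scope_py_spec : Claim_equal_parse_data_scope_py := by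
  intro scope _
  unfold Spec_parse_data_scope_py parse_data_scope_py parse_data_scope_py_alt
  cases scope with
  | none => rfl
  | some s =>
    by_cases h : s = ""
    · simp [h]
    · simp only [if_neg h]
      rw [pvLoopA_eq]
      simp only [pvUpdF]
      rw [pvScanB_eq_lastVal, pvScanB_eq_lastVal, pvScanB_eq_lastVal, pvScanB_eq_lastVal,
        pvScanB_eq_lastVal]
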